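-- pv_equiv track=rewrite | github.com/traylinx/tytus-cli | .github/scripts/render_homebrew_formula.py | drop_empty_on_arm_blocks
-- ===== SOURCE A (Python) =====
-- def drop_empty_on_arm_blocks(text: str) -> str:
--     """
--     Drop any on_arm/on_intel block whose sha256 line was rendered as empty
--     (`sha256 ""`). This happens when a target had no SHA provided (e.g.
--     linux-aarch64 wasn't built for this release).
--
--     Operates line-by-line so we don't need a full Ruby parser.
--     """
--     lines = text.split("\n")
--     out = []
--     i = 0
--     while i < len(lines):
--         line = lines[i]
--         stripped = line.strip()
--
--         if stripped in ("on_arm do", "on_intel do"):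
--             # Collect lines until matching `end`
--             block = [line]
--             depth = 1
--             i += 1
--             while i < len(lines) and depth > 0:
--                 block.append(lines[i])
--                 s = lines[i].strip()
--                 if s.endswith(" do") or s == "do":
--                     depth += 1
--                 elif s == "end":
--                     depth -= 1
--                 i += 1
--             block_text = "\n".join(block)
--             # Drop if the sha256 line is empty (missing build target)
--             if 'sha256 ""' in block_text:
--                 continue
--             out.append(block_text)
--             continue
--
--         out.append(line)
--         i += 1
--
--     return "\n".join(out)
-- ===== SOURCE B (Python) =====
-- def drop_empty_on_arm_blocks(text: str) -> str:
--     """Two-pass rewrite: a single forward state-machine pass parses the lines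
--     into segments (plain line, or a whole on_arm/on_intel block); a second pass
--     filters out block segments containing `sha256 ""` and joins the rest."""
--     segments = []          # list of (is_block, [lines])
--     block = None           # (lines_so_far, depth) while inside a block
--     for line in text.split("\n"):
--         s = line.strip()
--         if block is None:
--             if s in ("on_arm do", "on_intel do"):
--                 block = ([line], 1)
--             else:
--                 segments.append((False, [line]))
--         else:
--             bl, depth = block
--             bl.append(line)
--             if s.endswith(" do") or s == "do":
--                 depth += 1
--             elif s == "end":
--                 depth -= 1
--             if depth == 0:
--                 segments.append((True, bl))
--                 block = None
--             else:
--                 block = (bl, depth)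
--     if block is not None:
--         segments.append((True, block[0]))
--     kept = []
--     for is_block, bl in segments:
--         t = "\n".join(bl)
--         if not (is_block and 'sha256 ""' in t):
--             kept.append(t)
--     return "\n".join(kept)
-- ===== Notes on version B (the rewrite author's own statement) =====
-- stated objective: alternative
-- what changed: A's single interleaved scan-and-emit while-loop with an inner block-collecting loop is split into a one-pass state-machine fold that parses lines into segments (plain line or whole on_arm/on_intel block) and a separate filter pass that drops block segments containing 'sha256 ""' before joining.
import Mathlib
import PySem

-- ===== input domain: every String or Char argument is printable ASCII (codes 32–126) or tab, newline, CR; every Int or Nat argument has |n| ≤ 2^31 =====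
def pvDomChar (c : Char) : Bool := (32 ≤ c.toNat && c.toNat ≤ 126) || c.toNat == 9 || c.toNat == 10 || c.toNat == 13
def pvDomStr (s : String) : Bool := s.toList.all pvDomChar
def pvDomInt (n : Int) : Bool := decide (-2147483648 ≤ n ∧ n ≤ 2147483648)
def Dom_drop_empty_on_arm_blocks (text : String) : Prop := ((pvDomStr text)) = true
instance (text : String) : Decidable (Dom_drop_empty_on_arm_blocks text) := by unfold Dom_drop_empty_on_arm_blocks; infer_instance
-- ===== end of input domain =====

-- B re-decomposes A's interleaved scan-and-emit loop into a one-pass parse into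
-- segments followed by a filter pass; same return value, same cost (objective: alternative).

-- ===== PORT A =====
-- inner `while i < len(lines) and depth > 0` loop: accumulates block lines (reversed),
-- returns (block, remaining lines)
def pvCollectA : List String → Int → List String → List String × List String
  | [], _, block => (block.reverse, [])
  | x :: rest, depth, block =>
    if depth > 0 then
      let block' := x :: block
      let s := PySem.Str.strip x
      let d' := if PySem.Str.endswith s " do" || s == "do" then depth + 1
                else if s == "end" then depth - 1 else depth
      pvCollectA rest d' block'
    else (block.reverse, x :: rest)

theorem pvCollectA_len (xs : List String) : ∀ d b, (pvCollectA xs d b).2.length ≤ xs.length := by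
  induction xs with
  | nil => intro d b; simp [pvCollectA]
  | cons x rest ih =>
    intro d b
    simp only [pvCollectA]
    split
    · exact Nat.le_succ_of_le (ih _ _)
    · simp

-- outer `while i < len(lines)` loop of A
-- lines = text.split("\n") (both Pythons do this split)
def pvLines (text : String) : List String :=
  (PySem.Chars.splitOn text.toList ['\n']).map String.ofList

def pvGoA : List String → List String
  | [] => []
  | l :: rest =>
    let stripped := PySem.Str.strip l
    if stripped == "on_arm do" || stripped == "on_intel do" then
      let p := pvCollectA rest 1 [l]
      let block_text := PySem.Str.join "\n" p.1
      if PySem.Str.isIn "sha256 \"\"" block_text then pvGoA p.2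
      else block_text :: pvGoA p.2
    else l :: pvGoA rest
termination_by xs => xs.length
decreasing_by
  all_goals first
    | exact Nat.lt_succ_of_le (pvCollectA_len rest 1 [l])
    | simp

def drop_empty_on_arm_blocks (text : String) : String :=
  PySem.Str.join "\n" (pvGoA (pvLines text))

-- ===== PORT B =====
-- state: (segments collected so far, reversed; current open block (reversed lines, depth) if any)
def pvStepB (st : List (Bool × List String) × Option (List String × Int)) (line : String) :
    List (Bool × List String) × Option (List String × Int) :=
  let s := PySem.Str.strip line
  match st with
  | (segs, none) =>
    if s == "on_arm do" || s == "on_intel do" then (segs, some ([line], 1))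
    else ((false, [line]) :: segs, none)
  | (segs, some (bl, depth)) =>
    let bl' := line :: bl
    let d' := if PySem.Str.endswith s " do" || s == "do" then depth + 1
              else if s == "end" then depth - 1 else depth
    if d' == 0 then ((true, bl'.reverse) :: segs, none)
    else (segs, some (bl', d'))

-- close a pending unterminated block and restore order
def pvFinishB (st : List (Bool × List String) × Option (List String × Int)) :
    List (Bool × List String) :=
  (match st.2 with
   | some (bl, _) => (true, bl.reverse) :: st.1
   | none => st.1).reverse

def pvKeepB (seg : Bool × List String) : Option String :=
  let t := PySem.Str.join "\n" seg.2
  if seg.1 && PySem.Str.isIn "sha256 \"\"" t then none else some t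

def drop_empty_on_arm_blocks_alt (text : String) : String :=
  PySem.Str.join "\n"
    ((pvFinishB ((pvLines text).foldl pvStepB ([], none))).filterMap pvKeepB)

-- ===== PRECONDITION & SPEC =====
def Spec_drop_empty_on_arm_blocks (text : String) (out : String) : Prop := out = drop_empty_on_arm_blocks_alt text
instance (text : String) (out : String) : Decidable (Spec_drop_empty_on_arm_blocks text out) := by unfold Spec_drop_empty_on_arm_blocks; infer_instance

-- ===== CLAIM (what is proved, stated in full; the proofs are below) =====
def Claim_equal_drop_empty_on_arm_blocks : Prop := ∀ (text : String), Dom_drop_empty_on_arm_blocks text → Spec_drop_empty_on_arm_blocks text (drop_empty_on_arm_blocks text)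

-- ===== LEMMAS AND PROOFS =====

theorem pvJoin_singleton (s : String) : PySem.Str.join "\n" [s] = s := by
  simp [PySem.Str.join, PySem.Chars.join, List.intercalate]

-- B's fold while inside an open block equals A's inner collector followed by B restarted
theorem pvBlock_eq (ys : List String) : ∀ (depth : Int) (bl : List String)
    (segs : List (Bool × List String)), 0 < depth →
    pvFinishB (ys.foldl pvStepB (segs, some (bl, depth)))
      = pvFinishB ((pvCollectA ys depth bl).2.foldl pvStepB
          ((true, (pvCollectA ys depth bl).1) :: segs, none)) := by
  induction ys with
  | nil =>
    intro depth bl segs hd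
    simp [pvCollectA, pvFinishB]
  | cons y ys ih =>
    intro depth bl segs hd
    have hdpos : (pvCollectA (y :: ys) depth bl) = pvCollectA ys
        (if PySem.Str.endswith (PySem.Str.strip y) " do" || PySem.Str.strip y == "do" then depth + 1
         else if PySem.Str.strip y == "end" then depth - 1 else depth) (y :: bl) := by
      simp only [pvCollectA, if_pos hd]
    set d' := (if PySem.Str.endswith (PySem.Str.strip y) " do" || PySem.Str.strip y == "do" then depth + 1
         else if PySem.Str.strip y == "end" then depth - 1 else depth) with hd'
    by_cases h0 : d' = 0
    · -- block closes on this line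
      have hstep : pvStepB (segs, some (bl, depth)) y
          = ((true, (y :: bl).reverse) :: segs, none) := by
        simp only [pvStepB, ← hd', h0]
        simp
      have hcol : pvCollectA ys d' (y :: bl) = ((y :: bl).reverse, ys) := by
        cases ys with
        | nil => simp [pvCollectA]
        | cons z zs => simp [pvCollectA, h0]
      rw [List.foldl_cons, hstep, hdpos, hcol]
    · -- block stays open with depth d' > 0
      have hd'pos : 0 < d' := by
        rw [hd'] at h0 ⊢
        split at h0 <;> split <;> simp_all <;> omega
      have hstep : pvStepB (segs, some (bl, depth)) y = (segs, some (y :: bl, d')) := by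
        simp only [pvStepB, ← hd']
        have : (d' == 0) = false := by simpa using h0
        simp [this]
      rw [List.foldl_cons, hstep, hdpos, ih d' (y :: bl) segs hd'pos]

-- main invariant: B's parse-then-filter from any accumulator equals A's fused loop
theorem pvMain (n : Nat) : ∀ (xs : List String), xs.length ≤ n →
    ∀ (segs : List (Bool × List String)),
    (pvFinishB (xs.foldl pvStepB (segs, none))).filterMap pvKeepB
      = (segs.reverse.filterMap pvKeepB) ++ pvGoA xs := by
  induction n with
  | zero =>
    intro xs hxs segs
    have : xs = [] := List.eq_nil_of_length_eq_zero (Nat.le_zero.mp hxs)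
    subst this
    simp [pvFinishB, pvGoA]
  | succ n ih =>
    intro xs hxs segs
    cases xs with
    | nil => simp [pvFinishB, pvGoA]
    | cons l rest =>
      by_cases hhdr : (PySem.Str.strip l == "on_arm do" || PySem.Str.strip l == "on_intel do") = true
      · -- header line: B opens a block
        have hstep : pvStepB (segs, none) l = (segs, some ([l], 1)) := by
          simp only [pvStepB]; rw [if_pos hhdr]
        rw [List.foldl_cons, hstep,
            pvBlock_eq rest 1 [l] segs (by norm_num)]
        have hrest : (pvCollectA rest 1 [l]).2.length ≤ n :=
          le_trans (pvCollectA_len rest 1 [l]) (by simpa using hxs)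
        rw [ih _ hrest]
        simp only [List.reverse_cons, List.filterMap_append]
        have hgo : pvGoA (l :: rest)
            = (if PySem.Str.isIn "sha256 \"\"" (PySem.Str.join "\n" (pvCollectA rest 1 [l]).1)
               then pvGoA (pvCollectA rest 1 [l]).2
               else PySem.Str.join "\n" (pvCollectA rest 1 [l]).1 :: pvGoA (pvCollectA rest 1 [l]).2) := by
          rw [pvGoA]; rw [if_pos hhdr]
        rw [hgo]
        by_cases hsha : PySem.Str.isIn "sha256 \"\"" (PySem.Str.join "\n" (pvCollectA rest 1 [l]).1) = true
        · simp at hsha; simp [pvKeepB, hsha]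
        · simp only [Bool.not_eq_true] at hsha
          simp at hsha; simp [pvKeepB, hsha]
      · -- plain line
        have hstep : pvStepB (segs, none) l = ((false, [l]) :: segs, none) := by
          simp only [pvStepB]; rw [if_neg hhdr]
        have hlen : rest.length ≤ n := by simp at hxs; omega
        rw [List.foldl_cons, hstep, ih _ hlen ((false, [l]) :: segs)]
        have hgo : pvGoA (l :: rest) = l :: pvGoA rest := by
          rw [pvGoA]; rw [if_neg hhdr]
        rw [hgo]
        simp [pvKeepB, pvJoin_singleton]

-- ===== VERDICT (by name: the statement is the Claim_ definition above) =====
theorem drop_empty_on_arm_blocks_spec : Claim_equal_drop_empty_on_arm_blocks := by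
  intro text _
  unfold Spec_drop_empty_on_arm_blocks drop_empty_on_arm_blocks drop_empty_on_arm_blocks_alt
  rw [pvMain (pvLines text).length (pvLines text) le_rfl []]
  simp
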